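-- pv_equiv track=rewrite | github.com/paiml/depyler | examples/hard_infer_accumulate.py | harmonic_sum_approx
-- ===== SOURCE A (Python) =====
-- def harmonic_sum_approx(n, scale):
--     """Approximate harmonic sum H(n) = 1/1 + 1/2 + ... + 1/n
--     using fixed-point with given scale factor."""
--     if n <= 0:
--         return 0
--     total = 0
--     i = 1
--     while i <= n:
--         total = total + scale // i
--         i = i + 1
--     return total
-- ===== SOURCE B (Python) =====
-- def _blocked_div_sum(m, n):
--     # sum of m // i for i = 1..n, with m >= 0, by grouping runs of equal quotient
--     total = 0
--     i = 1
--     while i <= n: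
--         q = m // i
--         if q == 0:
--             break
--         last = max(i, min(n, m // q))  # largest index with the same quotient q
--         total += q * (last - i + 1)
--         i = last + 1
--     return total
--
--
-- def harmonic_sum_approx(n, scale):
--     if n <= 0:
--         return 0
--     if scale >= 0:
--         return _blocked_div_sum(scale, n)
--     # for i > 0: scale // i == -((-scale - 1) // i) - 1
--     return -n - _blocked_div_sum(-scale - 1, n)
-- ===== Notes on version B (the rewrite author's own statement) =====
-- stated objective: faster
-- what changed: Replaces the term-by-term loop over i=1..n with quotient blocking: runs of i sharing the same floor(scale/i) are summed in one step (negative scale reduced to the nonnegative case via scale//i = -((-scale-1)//i)-1), so the loop does O(sqrt(scale)) iterations instead of n.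
import Mathlib
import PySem

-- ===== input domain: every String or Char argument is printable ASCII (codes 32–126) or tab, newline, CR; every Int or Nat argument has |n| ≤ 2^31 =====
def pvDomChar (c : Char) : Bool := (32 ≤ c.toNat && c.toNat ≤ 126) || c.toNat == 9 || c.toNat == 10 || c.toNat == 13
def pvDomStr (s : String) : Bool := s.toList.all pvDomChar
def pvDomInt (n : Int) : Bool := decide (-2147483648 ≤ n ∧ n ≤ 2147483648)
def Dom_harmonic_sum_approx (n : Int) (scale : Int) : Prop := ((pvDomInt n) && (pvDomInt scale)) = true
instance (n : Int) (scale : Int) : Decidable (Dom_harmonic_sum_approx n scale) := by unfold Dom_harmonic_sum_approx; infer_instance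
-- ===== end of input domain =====

-- B replaces the O(n) term-by-term loop with quotient blocking (runs of equal floor(scale/i)
-- summed in one step; negative scale reduced to the nonnegative case), measured faster.


-- ===== PORT A =====
-- A's while loop: total += scale // i; i += 1 while i ≤ n
def goA (n scale i total : Int) : Int :=
  if _h : i ≤ n then goA n scale (i + 1) (total + PySem.Int.floordiv scale i) else total
termination_by (n + 1 - i).toNat
decreasing_by omega

def harmonic_sum_approx (n : Int) (scale : Int) : Int :=
  if n ≤ 0 then 0 else goA n scale 1 0

-- ===== PORT B =====
-- B's while loop over blocks of constant quotient q = m // i (m ≥ 0 at every call site)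
def goB (m n i total : Int) : Int :=
  if _h : i ≤ n then
    let q := PySem.Int.floordiv m i
    if q = 0 then total
    else
      let last := max i (min n (PySem.Int.floordiv m q))
      goB m n (last + 1) (total + q * (last - i + 1))
  else total
termination_by (n + 1 - i).toNat
decreasing_by omega

def harmonic_sum_approx_alt (n : Int) (scale : Int) : Int :=
  if n ≤ 0 then 0
  else if 0 ≤ scale then goB scale n 1 0
  else -n - goB (-scale - 1) n 1 0

-- ===== PRECONDITION & SPEC =====
def Spec_harmonic_sum_approx (n : Int) (scale : Int) (out : Int) : Prop := out = harmonic_sum_approx_alt n scale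
instance (n : Int) (scale : Int) (out : Int) : Decidable (Spec_harmonic_sum_approx n scale out) := by unfold Spec_harmonic_sum_approx; infer_instance

-- ===== CLAIM (what is proved, stated in full; the proofs are below) =====
def Claim_equal_harmonic_sum_approx : Prop := ∀ (n : Int) (scale : Int), Dom_harmonic_sum_approx n scale → Spec_harmonic_sum_approx n scale (harmonic_sum_approx n scale)

-- ===== LEMMAS AND PROOFS =====

-- reference tail sum: ∑_{j=i..n} scale // j
def pvTsum (scale n i : Int) : Int :=
  if i ≤ n then PySem.Int.floordiv scale i + pvTsum scale n (i + 1) else 0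
termination_by (n + 1 - i).toNat
decreasing_by omega

theorem goA_eq (n scale i total : Int) : goA n scale i total = total + pvTsum scale n i := by
  fun_induction goA with
  | case1 i total h ih =>
    rw [pvTsum]; simp only [h, if_pos]; rw [ih]; ring
  | case2 i total h =>
    rw [pvTsum]; simp [h]

-- all terms vanish once m < i (m ≥ 0)
theorem pvTsum_zero (m n : Int) (hm : 0 ≤ m) :
    ∀ i, 0 < i → m < i → pvTsum m n i = 0 := by
  intro i
  fun_induction pvTsum m n i with
  | case1 i h ih =>
    intro hi hlt
    have hq : PySem.Int.floordiv m i = 0 := by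
      have h1 : PySem.Int.floordiv m i < 1 := by
        rw [PySem.Int.floordiv_lt_iff_lt_mul hi]; omega
      have h2 : (0 : Int) ≤ PySem.Int.floordiv m i := by
        rw [PySem.Int.le_floordiv_iff_mul_le hi]; omega
      omega
    rw [hq, ih (by omega) (by omega)]; ring
  | case2 i h => intro _ _; rfl

-- constant block [i, last] summed in one step
theorem pvTsum_block (m n q : Int) :
    ∀ (i last : Int), 0 < i → i - 1 ≤ last → last ≤ n →
      (∀ j, i ≤ j → j ≤ last → PySem.Int.floordiv m j = q) →
      pvTsum m n i = q * (last - i + 1) + pvTsum m n (last + 1) := by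
  have H : ∀ (k : Nat) (i last : Int), (last + 1 - i).toNat = k → 0 < i → i - 1 ≤ last → last ≤ n →
      (∀ j, i ≤ j → j ≤ last → PySem.Int.floordiv m j = q) →
      pvTsum m n i = q * (last - i + 1) + pvTsum m n (last + 1) := by
    intro k
    induction k with
    | zero =>
      intro i last hk hi hil hln _
      have : i = last + 1 := by omega
      subst this
      have : (last + 1 - (last + 1) + 1) = (1 : Int) := by ring
      rw [show q * (last - (last + 1) + 1) = 0 by ring]; ring
    | succ k ih =>
      intro i last hk hi hil hln hconst
      have hile : i ≤ last := by omega
      rw [pvTsum]; simp only [show i ≤ n from by omega, if_pos]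
      rw [hconst i (by omega) hile]
      rw [ih (i + 1) last (by omega) (by omega) (by omega) hln
        (fun j hj1 hj2 => hconst j (by omega) hj2)]
      ring
  intro i last h1 h2 h3 h4
  exact H (last + 1 - i).toNat i last rfl h1 h2 h3 h4

-- per-term negation identity: scale // i = -((-scale - 1) // i) - 1 for i > 0
theorem floordiv_neg_identity (a i : Int) (hi : 0 < i) :
    PySem.Int.floordiv a i = -(PySem.Int.floordiv (-a - 1) i) - 1 := by
  set q := PySem.Int.floordiv (-a - 1) i with hq
  have hb := (PySem.Int.floordiv_eq_iff_of_pos (a := -a - 1) (b := i) (q := q) hi).mp hq.symm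
  rw [PySem.Int.floordiv_eq_iff_of_pos hi]
  constructor
  · nlinarith [hb.2]
  · nlinarith [hb.1]

-- negate the whole tail sum
theorem pvTsum_neg (scale n : Int) :
    ∀ i, 0 < i → pvTsum scale n i = -(max (n - i + 1) 0) - pvTsum (-scale - 1) n i := by
  intro i
  fun_induction pvTsum scale n i with
  | case1 i h ih =>
    intro hi
    conv_rhs => rw [pvTsum]
    simp only [h, if_pos]
    rw [floordiv_neg_identity scale i hi, ih (by omega)]
    have h1 : max (n - i + 1) 0 = n - i + 1 := by omega
    have h2 : max (n - (i + 1) + 1) 0 = n - i := by omega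
    rw [h1, h2]; ring
  | case2 i h =>
    intro _
    conv_rhs => rw [pvTsum]
    simp only [h, if_false]
    have : max (n - i + 1) 0 = 0 := by omega
    rw [this]
    simp

theorem goB_eq (m n : Int) (hm : 0 ≤ m) :
    ∀ i total, 0 < i → goB m n i total = total + pvTsum m n i := by
  intro i total
  fun_induction goB m n i total with
  | case1 i total h q hq0 =>
    -- q = 0: remaining terms are all 0
    intro hi
    have h1 : PySem.Int.floordiv m i = 0 := hq0
    have hlt : m < i := by
      have h2 : PySem.Int.floordiv m i < 1 := by omega
      rw [PySem.Int.floordiv_lt_iff_lt_mul hi] at h2; omega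
    rw [pvTsum_zero m n hm i hi hlt]; ring
  | case2 i total h q hnq last ih =>
    intro hi
    have hqdef : PySem.Int.floordiv m i = q := rfl
    have hq0 : 0 ≤ q := by
      rw [← hqdef, PySem.Int.le_floordiv_iff_mul_le hi]; omega
    have hqpos : 0 < q := by omega
    have hiq : i * q ≤ m := by
      have h3 := (PySem.Int.le_floordiv_iff_mul_le (a := m) (b := i) (q := q) hi).mp (le_of_eq hqdef.symm)
      linarith
    have hifd : i ≤ PySem.Int.floordiv m q := by
      rw [PySem.Int.le_floordiv_iff_mul_le hqpos]; linarith
    have hlastdef : last = max i (min n (PySem.Int.floordiv m q)) := rfl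
    have hlast_le_n : last ≤ n := by omega
    have hlast_ge : i ≤ last := by omega
    have hlast_le_fd : last ≤ PySem.Int.floordiv m q := by omega
    have hconst : ∀ j, i ≤ j → j ≤ last → PySem.Int.floordiv m j = q := by
      intro j hj1 hj2
      have hjpos : 0 < j := by omega
      have hge : q ≤ PySem.Int.floordiv m j := by
        rw [PySem.Int.le_floordiv_iff_mul_le hjpos]
        have h4 : j ≤ PySem.Int.floordiv m q := by omega
        rw [PySem.Int.le_floordiv_iff_mul_le hqpos] at h4
        linarith
      have hle : PySem.Int.floordiv m j ≤ q := by
        by_contra hc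
        rw [not_le] at hc
        have h5 : (q + 1) * j ≤ m := by
          have h6 := (PySem.Int.le_floordiv_iff_mul_le (a := m) (b := j) (q := q + 1) hjpos).mp (by omega)
          linarith
        have h7 : (q + 1) * i ≤ m := by nlinarith
        have h8 : q + 1 ≤ PySem.Int.floordiv m i := by
          rw [PySem.Int.le_floordiv_iff_mul_le hi]; linarith
        omega
      omega
    rw [ih (by omega)]
    rw [pvTsum_block m n q i last hi (by omega) hlast_le_n hconst]
    ring
  | case3 i total h =>
    intro _
    rw [pvTsum]; simp [h]

-- ===== VERDICT (by name: the statement is the Claim_ definition above) =====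
theorem harmonic_sum_approx_spec : Claim_equal_harmonic_sum_approx := by
  intro n scale _
  unfold Spec_harmonic_sum_approx harmonic_sum_approx harmonic_sum_approx_alt
  by_cases hn : n ≤ 0
  · simp [hn]
  · simp only [hn, if_false]
    rw [goA_eq]
    by_cases hs : 0 ≤ scale
    · rw [if_pos hs, goB_eq scale n hs 1 0 (by omega)]
    · rw [if_neg hs, goB_eq (-scale - 1) n (by omega) 1 0 (by omega)]
      rw [pvTsum_neg scale n 1 (by omega)]
      have : max (n - 1 + 1) 0 = n := by omega
      rw [this]; ring
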